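-- pv_equiv track=rewrite | github.com/jrcasoto/Python | CodeForces/Elephant.py | elephant
-- ===== SOURCE A (Python) =====
-- def elephant(x):
--     s = 0
--     e = 5
--     while e != 0:
--         if x // e > 0:
--             s += x // e
--             x -= (x // e) * e
--         e -= 1
--     return s
-- ===== SOURCE B (Python) =====
-- def elephant(x):
--     # closed form: ceil(x/5) steps, 0 for non-positive x
--     return 0 if x < 1 else (x + 4) // 5
-- ===== Notes on version B (the rewrite author's own statement) =====
-- stated objective: simpler
-- what changed: Replaces the five-iteration greedy loop over step sizes 5..1 with the closed form ceil(x/5) = (x+4)//5, guarded to 0 for x < 1.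
import Mathlib
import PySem

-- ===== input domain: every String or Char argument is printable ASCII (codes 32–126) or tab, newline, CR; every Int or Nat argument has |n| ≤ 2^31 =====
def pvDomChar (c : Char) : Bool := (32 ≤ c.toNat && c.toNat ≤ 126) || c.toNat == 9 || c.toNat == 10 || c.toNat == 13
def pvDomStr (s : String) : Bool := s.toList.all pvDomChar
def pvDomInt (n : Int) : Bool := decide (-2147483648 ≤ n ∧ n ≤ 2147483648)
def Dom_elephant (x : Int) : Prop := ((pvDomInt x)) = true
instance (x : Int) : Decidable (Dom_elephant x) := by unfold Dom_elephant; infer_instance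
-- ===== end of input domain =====

-- B replaces A's five-iteration greedy loop with the closed form ceil(x/5), guarded to 0 for x < 1 (objective: simpler).
-- ===== PORT A =====
-- literal port of A: five-iteration while loop, recursion on the counter e
def elephantLoop : Nat → Int → Int → Int
  | 0, s, _ => s
  | Nat.succ e', s, x =>
      let e : Int := (Nat.succ e' : Nat)
      if PySem.Int.floordiv x e > 0 then
        elephantLoop e' (s + PySem.Int.floordiv x e) (x - PySem.Int.floordiv x e * e)
      else
        elephantLoop e' s x

def elephant (x : Int) : Int := elephantLoop 5 0 x

-- ===== PORT B =====
-- port of B: closed form, guarded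
def elephant_alt (x : Int) : Int := if x < 1 then 0 else PySem.Int.floordiv (x + 4) 5

-- ===== PRECONDITION & SPEC =====
def Spec_elephant (x : Int) (out : Int) : Prop := out = elephant_alt x
instance (x : Int) (out : Int) : Decidable (Spec_elephant x out) := by unfold Spec_elephant; infer_instance

-- ===== CLAIM (what is proved, stated in full; the proofs are below) =====
def Claim_equal_elephant : Prop := ∀ (x : Int), Dom_elephant x → Spec_elephant x (elephant x)

-- ===== LEMMAS AND PROOFS =====

-- ===== VERDICT (by name: the statement is the Claim_ definition above) =====
theorem elephant_spec : Claim_equal_elephant := by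
  intro x _
  unfold Spec_elephant elephant elephant_alt
  simp only [elephantLoop, PySem.Int.floordiv]
  norm_num [Int.fdiv_eq_ediv]
  split_ifs <;> omega
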